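-- pv_equiv track=rewrite | github.com/yKuzmenko740/Geek_Brains_tutorial | Third_lesson/homework/fifth_task.py | negatives
-- ===== SOURCE A (Python) =====
-- def negatives(array):
--     neg = []
--     for i in array:
--         if i < 0:
--             neg.append(i)
--     m = neg[0]
--     for i in neg:
--         if i > m:
--             m = i
--         else:
--             continue
--     return f"Максимальное отрицательное число {m}, в позиции {array.index(m)}"
-- ===== SOURCE B (Python) =====
-- def negatives(array):
--     neg = sorted(x for x in array if x < 0)
--     m = neg[-1]
--     return f"Максимальное отрицательное число {m}, в позиции {array.index(m)}"
-- ===== Notes on version B (the rewrite author's own statement) =====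
-- stated objective: simpler
-- what changed: A's append loop plus running-max scan is replaced by a one-line comprehension-and-sort: B sorts the negatives and takes the last element of the sorted list as the maximum, keeping array.index(m) for the position.
import Mathlib
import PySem

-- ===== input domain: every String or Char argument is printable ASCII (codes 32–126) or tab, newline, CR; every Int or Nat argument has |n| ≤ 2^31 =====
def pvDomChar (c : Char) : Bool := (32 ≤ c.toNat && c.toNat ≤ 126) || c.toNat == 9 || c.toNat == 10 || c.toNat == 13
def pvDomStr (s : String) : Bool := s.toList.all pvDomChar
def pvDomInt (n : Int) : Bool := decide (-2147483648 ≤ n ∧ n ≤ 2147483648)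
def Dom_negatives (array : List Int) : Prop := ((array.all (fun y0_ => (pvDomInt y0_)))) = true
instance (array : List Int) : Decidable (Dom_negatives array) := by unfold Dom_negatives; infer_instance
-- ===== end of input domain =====

-- B replaces A's two scans (collect negatives, then a running-max loop) by sorting the
-- negatives and indexing the sorted list; objective: simpler. Both raise IndexError on a
-- list with no negative number (excluded by Pre_).

-- ===== PORT A =====
def negatives (array : List Int) : String :=
  -- neg = []; for i in array: if i < 0: neg.append(i)
  let neg := array.foldl (fun acc i => if i < 0 then acc ++ [i] else acc) []
  -- m = neg[0]  (IndexError when neg is empty: excluded by Pre_)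
  match PySem.List.pyGet? neg 0 with
  | none => ""
  | some m0 =>
    -- for i in neg: if i > m: m = i
    let m := neg.foldl (fun m i => if i > m then i else m) m0
    -- array.index(m): m is always a member here, so .getD 0 is never taken
    "Максимальное отрицательное число " ++ PySem.Int.toStr m ++ ", в позиции " ++
      PySem.Int.toStr (((PySem.List.index? array m).getD 0 : Nat) : Int)

-- ===== PORT B =====
def negatives_alt (array : List Int) : String :=
  -- neg = sorted(x for x in array if x < 0)
  let neg := PySem.List.sorted (array.filter (fun x => decide (x < 0))) (fun x => x)
  -- m = neg[-1]  (IndexError when neg is empty: excluded by Pre_)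
  match PySem.List.pyGet? neg (-1) with
  | none => ""
  | some m =>
    "Максимальное отрицательное число " ++ PySem.Int.toStr m ++ ", в позиции " ++
      PySem.Int.toStr (((PySem.List.index? array m).getD 0 : Nat) : Int)

-- ===== PRECONDITION & SPEC =====
-- Pre_ excludes exactly the inputs with no negative element, on which both Pythons raise IndexError.
def Pre_negatives (array : List Int) : Prop := ∃ x ∈ array, x < 0
instance (array : List Int) : Decidable (Pre_negatives array) := by unfold Pre_negatives; infer_instance
def pvWitness_negatives : List Int := [3, -2, -7, -2]

def Spec_negatives (array : List Int) (out : String) : Prop := out = negatives_alt array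
instance (array : List Int) (out : String) : Decidable (Spec_negatives array out) := by unfold Spec_negatives; infer_instance

-- ===== CLAIM (what is proved, stated in full; the proofs are below) =====
def Claim_equal_negatives : Prop := ∀ (array : List Int), Dom_negatives array → Pre_negatives array → Spec_negatives array (negatives array)

-- ===== LEMMAS AND PROOFS =====

-- A's update function is just `max`.
theorem pv_updater_eq_max : (fun (m i : Int) => if i > m then i else m) = max := by
  funext m i
  simp only [max_def]
  split_ifs <;> omega

-- A left fold of `max` lands on its seed or on a list element.
theorem pv_foldl_max_mem (t : List Int) (a : Int) :
    t.foldl max a = a ∨ t.foldl max a ∈ t := by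
  induction t generalizing a with
  | nil => exact Or.inl rfl
  | cons b t ih =>
    rcases ih (max a b) with h | h
    · rcases max_choice a b with hm | hm
      · exact Or.inl (by rw [List.foldl_cons, h, hm])
      · exact Or.inr (by rw [List.foldl_cons, h, hm]; exact List.mem_cons_self)
    · exact Or.inr (List.mem_cons_of_mem _ h)

-- In a ≤-pairwise list the last element bounds every element.
theorem pv_le_getLast (l : List Int) (hp : l.Pairwise (· ≤ ·)) (hne : l ≠ [])
    (x : Int) (hx : x ∈ l) : x ≤ l.getLast hne := by
  induction l with
  | nil => cases hx
  | cons b t ih =>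
    cases t with
    | nil =>
      simp only [List.mem_singleton] at hx
      simp [hx]
    | cons c t' =>
      rw [List.getLast_cons (by simp)]
      rcases List.mem_cons.mp hx with hxb | hxt
      · have hb := (List.pairwise_cons.mp hp).1
        exact hxb ▸ hb _ (List.getLast_mem _)
      · exact ih (List.pairwise_cons.mp hp).2 (by simp) hxt

-- ===== VERDICT =====
theorem negatives_spec : Claim_equal_negatives := by
  intro array _ hpre
  unfold Spec_negatives negatives negatives_alt
  have hA : array.foldl (fun (acc : List Int) i => if i < 0 then acc ++ [i] else acc) []
      = array.filter (fun x => decide (x < 0)) := by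
    have := PySem.List.foldl_append_if (fun x : Int => decide (x < 0)) id array []
    simpa using this
  set neg := array.filter (fun x => decide (x < 0)) with hneg
  rw [hA]
  have hne : neg ≠ [] := by
    obtain ⟨x, hx, hxneg⟩ := hpre
    intro h
    have hmem : x ∈ neg := by simp [hneg, List.mem_filter, hx, hxneg]
    rw [h] at hmem
    cases hmem
  set s := PySem.List.sorted neg (fun x => x) with hs
  have hsne : s ≠ [] := by
    intro h
    exact hne ((PySem.List.sorted_eq_nil_iff neg (fun x => x) false).mp h)
  obtain ⟨n0, rest, hneg_eq⟩ : ∃ n0 rest, neg = n0 :: rest :=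
    List.exists_cons_of_ne_nil hne
  have hget0 : PySem.List.pyGet? neg 0 = some n0 := by
    rw [hneg_eq]; exact PySem.List.pyGet?_zero_cons _ _
  have hgetL : PySem.List.pyGet? s (-1) = some (s.getLast hsne) := by
    rw [PySem.List.pyGet?_neg_one, List.getLast?_eq_getLast_of_ne_nil hsne]
  set mA := neg.foldl max n0 with hmA
  have hfun : neg.foldl (fun m i => if i > m then i else m) n0 = mA := by
    rw [pv_updater_eq_max, hmA]
  set mB := s.getLast hsne with hmB
  have hmA_eq : mA = rest.foldl max n0 := by
    rw [hmA, hneg_eq, List.foldl_cons, max_self]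
  have hmA_mem : mA ∈ neg := by
    rw [hmA_eq]
    rcases pv_foldl_max_mem rest n0 with h | h
    · rw [hneg_eq, h]; exact List.mem_cons_self
    · rw [hneg_eq]; exact List.mem_cons_of_mem _ h
  have hmA_ub : ∀ y ∈ neg, y ≤ mA := by
    intro y hy
    rw [hneg_eq] at hy
    have hb := PySem.List.le_foldl_max rest n0
    rcases List.mem_cons.mp hy with hyb | hyt
    · rw [hmA_eq, hyb]; exact hb.1
    · rw [hmA_eq]; exact hb.2 _ hyt
  have hmB_mem : mB ∈ neg := by
    have hmem : mB ∈ s := List.getLast_mem hsne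
    exact ((PySem.List.sorted_perm neg (fun x => x) false).mem_iff).mp hmem
  have hmB_ub : ∀ y ∈ neg, y ≤ mB := by
    intro y hy
    have hys : y ∈ s := ((PySem.List.sorted_perm neg (fun x => x) false).mem_iff).mpr hy
    have hp : s.Pairwise (· ≤ ·) := by
      have := PySem.List.sorted_pairwise neg (fun x => x)
      simpa using this
    exact pv_le_getLast s hp hsne y hys
  have hM : mA = mB := le_antisymm (hmB_ub _ hmA_mem) (hmA_ub _ hmB_mem)
  simp only [hget0, hgetL, hfun, hM]
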